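-- pv_equiv track=rewrite | github.com/chitsuenchan/Computer-Science-Fundamentals | Learning/Week 2/13. Sum vs XOR [Solution].py | sumXor
-- ===== SOURCE A (Python) =====
-- def sumXor(n):
--     if n == 0:
--         return 1
--     else:
--         count = 0
--         while n:
--             if n % 2 == 0:
--                 count += 1
--             n >>= 1
--         return 2 ** count
-- ===== SOURCE B (Python) =====
-- def sumXor(n):
--     # closed form: number of zero bits of n is bit_length - popcount; answer is 2 to that power
--     return 2 ** (n.bit_length() - n.bit_count())
-- ===== Notes on version B (the rewrite author's own statement) =====
-- stated objective: idiomatic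
-- what changed: Replaced the explicit bit-scanning while loop with the closed-form expression 2 ** (n.bit_length() - n.bit_count()), which needs no loop and no special zero case.
import Mathlib
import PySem

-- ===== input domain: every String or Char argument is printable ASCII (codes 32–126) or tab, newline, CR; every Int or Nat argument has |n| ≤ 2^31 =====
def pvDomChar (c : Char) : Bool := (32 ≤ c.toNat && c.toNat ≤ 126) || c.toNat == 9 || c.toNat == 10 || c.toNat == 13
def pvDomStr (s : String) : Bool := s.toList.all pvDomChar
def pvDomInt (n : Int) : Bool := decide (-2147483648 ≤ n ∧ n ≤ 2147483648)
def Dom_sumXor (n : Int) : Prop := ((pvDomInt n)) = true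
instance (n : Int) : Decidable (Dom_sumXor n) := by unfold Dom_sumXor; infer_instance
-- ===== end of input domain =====

-- B replaces A's bit-scanning while loop by the closed form 2 ** (bit_length - popcount).
-- A's while loop never terminates for negative n (n >>= 1 stalls at -1), so Pre_ restricts to 0 ≤ n.

-- ===== PORT A =====
-- the 'while n:' loop; the guard '0 < n' (instead of 'n ≠ 0') makes the recursion total —
-- on Pre_ (0 ≤ n) the loop body is only ever entered with n > 0, so this is the same computation
def sumXorLoop (n count : Int) : Int :=
  if h : 0 < n then
    sumXorLoop (PySem.Int.floordiv n 2)
      (if PySem.Int.mod n 2 = 0 then count + 1 else count)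
  else 2 ^ count.toNat
termination_by n.toNat
decreasing_by
  have h2 : PySem.Int.floordiv n 2 = n / 2 := PySem.Int.floordiv_eq_ediv_of_pos (by omega)
  rw [h2]; omega

def sumXor (n : Int) : Int :=
  if n = 0 then 1 else sumXorLoop n 0

-- ===== PORT B =====
def sumXor_alt (n : Int) : Int :=
  2 ^ (PySem.Int.bitLength n - PySem.Int.bitCount n)

-- ===== PRECONDITION & SPEC =====
-- A's while loop diverges for negative n (Python right shift stalls at -1), so Pre_ excludes n < 0.
def Pre_sumXor (n : Int) : Prop := 0 ≤ n
instance (n : Int) : Decidable (Pre_sumXor n) := by unfold Pre_sumXor; infer_instance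
def pvWitness_sumXor : Int := (5)
def Spec_sumXor (n : Int) (out : Int) : Prop := out = sumXor_alt n
instance (n : Int) (out : Int) : Decidable (Spec_sumXor n out) := by unfold Spec_sumXor; infer_instance

-- ===== CLAIM (what is proved, stated in full; the proofs are below) =====
def Claim_equal_sumXor : Prop := ∀ (n : Int), Dom_sumXor n → Pre_sumXor n → Spec_sumXor n (sumXor n)

-- ===== LEMMAS AND PROOFS =====

-- number of zero bits, the exponent B computes
def pvZeros (n : Int) : Nat := PySem.Int.bitLength n - PySem.Int.bitCount n

theorem pvZeros_step (n : Int) (hn : 0 < n) :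
    pvZeros n = (if PySem.Int.mod n 2 = 0 then 1 else 0) + pvZeros (PySem.Int.floordiv n 2) := by
  have hL := PySem.Int.bitLength_of_pos (n := n) hn
  have hC := PySem.Int.bitCount_of_pos (n := n) hn
  have hle := PySem.Int.bitCount_le_bitLength (PySem.Int.floordiv n 2)
  have hm := PySem.Int.mod_two_eq n
  unfold pvZeros
  rw [hL, hC]
  rcases hm with hm | hm <;> rw [hm] <;> simp only [if_pos, Int.toNat_zero,
    Int.toNat_one, one_ne_zero, reduceIte] <;> omega

theorem pvLoop_eq (k : Nat) : ∀ (n c : Int), n.toNat ≤ k → 0 < n → 0 ≤ c →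
    sumXorLoop n c = 2 ^ (c.toNat + pvZeros n) := by
  induction k with
  | zero => intro n c hk hn; omega
  | succ k ih =>
    intro n c hk hn hc
    rw [sumXorLoop]
    have hfd : PySem.Int.floordiv n 2 = n / 2 := PySem.Int.floordiv_eq_ediv_of_pos (by omega)
    have hz := pvZeros_step n hn
    simp only [hn, dif_pos]
    by_cases h2 : PySem.Int.floordiv n 2 > 0
    · rw [ih (PySem.Int.floordiv n 2) _ (by rw [hfd]; omega) h2 (by split <;> omega)]
      split <;> simp_all [pvZeros] <;> omega
    · -- floordiv n 2 = 0, hence n = 1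
      have hn1 : n = 1 := by rw [hfd] at h2; omega
      subst hn1
      rw [sumXorLoop]
      have : ¬ (0 : Int) < PySem.Int.floordiv 1 2 := h2
      simp only [this]
      have hz1 : pvZeros 1 = 0 := by decide
      have hm1 : PySem.Int.mod 1 2 = 1 := by decide
      simp [hz1]

-- ===== VERDICT (by name: the statement is the Claim_ definition above) =====
theorem sumXor_spec : Claim_equal_sumXor := by
  intro n _ hpre
  unfold Spec_sumXor sumXor
  by_cases h0 : n = 0
  · subst h0; decide
  · have hn : 0 < n := by unfold Pre_sumXor at hpre; omega
    rw [if_neg h0, pvLoop_eq n.toNat n 0 le_rfl hn le_rfl]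
    simp [sumXor_alt, pvZeros]
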